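-- pv_equiv track=rewrite | github.com/Timothy2105/tidybot-autonav | object-detection/molmo.py | is_relevant_alt
-- ===== SOURCE A (Python) =====
-- def is_relevant_alt(alt_text, target_object):
--     alt_lower = alt_text.lower()
--     target_lower = target_object.lower()
--
--     if target_lower in alt_lower:
--         return True
--
--     # handle plurals and variations
--     target_variations = [
--         target_lower,
--         target_lower.rstrip('s'),
--         target_lower + 's',
--     ]
--
--     # common synonyms/variations
--     synonyms = {
--         'chair': ['seat', 'chair', 'stool'],
--         'wheel': ['wheel', 'tire', 'rim'],
--         'door': ['door', 'entrance', 'doorway'],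
--         'window': ['window', 'glass'],
--         'table': ['table', 'desk'],
--         'computer': ['computer', 'pc', 'laptop', 'monitor', 'screen'],
--         'phone': ['phone', 'telephone', 'mobile'],
--     }
--
--     for key, values in synonyms.items():
--         if target_lower in values:
--             for synonym in values:
--                 if synonym in alt_lower:
--                     return True
--
--     # check variations
--     for variation in target_variations:
--         if variation in alt_lower:
--             return True
--
--     return False
-- ===== SOURCE B (Python) =====
-- _SYNONYM_GROUPS = [
--     ['seat', 'chair', 'stool'],
--     ['wheel', 'tire', 'rim'],
--     ['door', 'entrance', 'doorway'],
--     ['window', 'glass'],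
--     ['table', 'desk'],
--     ['computer', 'pc', 'laptop', 'monitor', 'screen'],
--     ['phone', 'telephone', 'mobile'],
-- ]
--
-- def _match_at(alt_lower, candidates, i):
--     # does any candidate pattern start at text position i?
--     return any(alt_lower.startswith(c, i) for c in candidates)
--
-- def is_relevant_alt(alt_text, target_object):
--     alt_lower = alt_text.lower()
--     target_lower = target_object.lower()
--     # phase 1: assemble the candidate patterns (target, plural variants, synonym group)
--     candidates = [target_lower, target_lower.rstrip('s'), target_lower + 's']
--     for group in _SYNONYM_GROUPS:
--         if target_lower in group:
--             candidates += group
--     # phase 2: one left-to-right sweep over the text positions (naive multi-pattern matching)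
--     for i in range(len(alt_lower) + 1):
--         if _match_at(alt_lower, candidates, i):
--             return True
--     return False
-- ===== Notes on version B (the rewrite author's own statement) =====
-- stated objective: alternative
-- what changed: B splits the work into a candidate-assembly phase followed by a single left-to-right sweep over the text positions, testing startswith at each index (naive multi-pattern matching), instead of A's three interleaved passes of early-returning substring 'in' checks.
import Mathlib
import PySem

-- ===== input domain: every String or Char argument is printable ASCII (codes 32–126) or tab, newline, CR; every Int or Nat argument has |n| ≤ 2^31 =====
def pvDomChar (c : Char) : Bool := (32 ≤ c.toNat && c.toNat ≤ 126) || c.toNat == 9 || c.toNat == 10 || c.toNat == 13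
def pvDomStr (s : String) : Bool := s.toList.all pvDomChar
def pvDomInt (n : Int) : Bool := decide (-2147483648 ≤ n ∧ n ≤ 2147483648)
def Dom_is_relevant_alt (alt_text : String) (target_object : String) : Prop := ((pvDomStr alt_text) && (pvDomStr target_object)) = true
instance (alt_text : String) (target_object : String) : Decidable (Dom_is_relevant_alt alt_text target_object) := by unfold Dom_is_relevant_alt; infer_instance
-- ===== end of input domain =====

-- B assembles the candidate patterns once, then finds a match by a single position sweep
-- with startswith (naive multi-pattern matching) instead of A's interleaved 'in' checks; same cost.

-- exact port of Python's s.rstrip('s') (PySem has no rstrip-with-chars): drop trailing 's' characters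
def rstripS (l : List Char) : List Char := (l.reverse.dropWhile (fun c => c == 's')).reverse

-- ===== PORT A =====
-- the literal synonyms dict from Source A
def synTable : List (List Char × List (List Char)) :=
  [("chair".toList, ["seat".toList, "chair".toList, "stool".toList]),
   ("wheel".toList, ["wheel".toList, "tire".toList, "rim".toList]),
   ("door".toList, ["door".toList, "entrance".toList, "doorway".toList]),
   ("window".toList, ["window".toList, "glass".toList]),
   ("table".toList, ["table".toList, "desk".toList]),
   ("computer".toList, ["computer".toList, "pc".toList, "laptop".toList, "monitor".toList, "screen".toList]),
   ("phone".toList, ["phone".toList, "telephone".toList, "mobile".toList])]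

def is_relevant_alt (alt_text : String) (target_object : String) : Bool :=
  let alt_lower := PySem.Chars.lower alt_text.toList
  let target_lower := PySem.Chars.lower target_object.toList
  if PySem.Chars.isIn target_lower alt_lower then true
  else
    let target_variations := [target_lower, rstripS target_lower, target_lower ++ ['s']]
    -- for key, values in synonyms.items(): … early return = List.any
    if synTable.any (fun kv => kv.2.contains target_lower && kv.2.any (fun syn => PySem.Chars.isIn syn alt_lower)) then true
    else target_variations.any (fun v => PySem.Chars.isIn v alt_lower)

-- ===== PORT B =====
-- the literal _SYNONYM_GROUPS list from Source B
def synGroups : List (List (List Char)) :=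
  [["seat".toList, "chair".toList, "stool".toList],
   ["wheel".toList, "tire".toList, "rim".toList],
   ["door".toList, "entrance".toList, "doorway".toList],
   ["window".toList, "glass".toList],
   ["table".toList, "desk".toList],
   ["computer".toList, "pc".toList, "laptop".toList, "monitor".toList, "screen".toList],
   ["phone".toList, "telephone".toList, "mobile".toList]]

-- Python's alt_lower.startswith(c, i) for 0 ≤ i ≤ len(alt_lower) is exactly startswith on (drop i)
def matchAt (alt_lower : List Char) (candidates : List (List Char)) (i : Nat) : Bool :=
  candidates.any (fun c => PySem.Chars.startswith (alt_lower.drop i) c)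

def is_relevant_alt_alt (alt_text : String) (target_object : String) : Bool :=
  let alt_lower := PySem.Chars.lower alt_text.toList
  let target_lower := PySem.Chars.lower target_object.toList
  -- phase 1: candidate assembly (loop with += = foldl with append)
  let candidates := synGroups.foldl
    (fun acc g => if g.contains target_lower then acc ++ g else acc)
    [target_lower, rstripS target_lower, target_lower ++ ['s']]
  -- phase 2: sweep over text positions range(len+1), early return = List.any
  (List.range (alt_lower.length + 1)).any (fun i => matchAt alt_lower candidates i)

-- ===== PRECONDITION & SPEC =====
def Spec_is_relevant_alt (alt_text : String) (target_object : String) (out : Bool) : Prop := out = is_relevant_alt_alt alt_text target_object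
instance (alt_text : String) (target_object : String) (out : Bool) : Decidable (Spec_is_relevant_alt alt_text target_object out) := by unfold Spec_is_relevant_alt; infer_instance

-- ===== CLAIM (what is proved, stated in full; the proofs are below) =====
def Claim_equal_is_relevant_alt : Prop := ∀ (alt_text : String) (target_object : String), Dom_is_relevant_alt alt_text target_object → Spec_is_relevant_alt alt_text target_object (is_relevant_alt alt_text target_object)

-- ===== LEMMAS AND PROOFS =====

-- the position sweep finds a candidate iff some candidate is a substring of the text
theorem sweep_eq_any_isIn (al : List Char) (cs : List (List Char)) :
    (List.range (al.length + 1)).any (fun i => matchAt al cs i)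
      = cs.any (fun c => PySem.Chars.isIn c al) := by
  simp only [matchAt]
  apply Bool.coe_iff_coe.mp
  simp only [List.any_eq_true, List.mem_range]
  constructor
  · rintro ⟨i, _, c, hc, hsw⟩
    refine ⟨c, hc, ?_⟩
    exact (PySem.Chars.exists_prefix_drop_iff_isIn c al).mp ⟨i, (PySem.Chars.startswith_iff _ _).mp hsw⟩
  · rintro ⟨c, hc, hin⟩
    obtain ⟨j, hj⟩ := (PySem.Chars.exists_prefix_drop_iff_isIn c al).mpr hin
    by_cases hle : j ≤ al.length
    · exact ⟨j, by omega, c, hc, (PySem.Chars.startswith_iff _ _).mpr hj⟩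
    · refine ⟨al.length, by omega, c, hc, (PySem.Chars.startswith_iff _ _).mpr ?_⟩
      have h1 : al.drop j = [] := List.drop_eq_nil_of_le (by omega)
      have h2 : al.drop al.length = [] := List.drop_eq_nil_of_le le_rfl
      rw [h2, ← h1]; exact hj

-- any over the candidate-assembly fold = any of the seed || some matching group has a hit
theorem any_foldl_append (P : List Char → Bool) (tl : List Char)
    (l : List (List (List Char))) (init : List (List Char)) :
    (l.foldl (fun acc g => if g.contains tl then acc ++ g else acc) init).any P
      = (init.any P || l.any (fun g => g.contains tl && g.any P)) := by
  induction l generalizing init with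
  | nil => simp
  | cons hd t ih =>
    simp only [List.foldl_cons, List.any_cons]
    rw [ih]
    by_cases h : tl ∈ hd
    · simp [h, List.any_append, Bool.or_assoc]
    · simp [h]

-- the core equality, stated over the two lowered char lists
theorem build_sweep_eq (al tl : List Char) :
    (if PySem.Chars.isIn tl al then true
     else
       if synTable.any (fun kv => kv.2.contains tl && kv.2.any (fun syn => PySem.Chars.isIn syn al)) then true
       else [tl, rstripS tl, tl ++ ['s']].any (fun v => PySem.Chars.isIn v al))
      = (List.range (al.length + 1)).any (fun i =>
          matchAt al (synGroups.foldl (fun acc g => if g.contains tl then acc ++ g else acc)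
            [tl, rstripS tl, tl ++ ['s']]) i) := by
  rw [sweep_eq_any_isIn, any_foldl_append (fun c => PySem.Chars.isIn c al) tl synGroups]
  have hgroups : synGroups.any (fun g => g.contains tl && g.any (fun c => PySem.Chars.isIn c al))
      = synTable.any (fun kv => kv.2.contains tl && kv.2.any (fun syn => PySem.Chars.isIn syn al)) := by
    simp [synGroups, synTable]
  rw [hgroups]
  simp only [List.any_cons, List.any_nil, Bool.or_false]
  cases PySem.Chars.isIn tl al
  · simp [Bool.or_comm]
  · simp

-- ===== VERDICT (by name: the statement is the Claim_ definition above) =====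
theorem is_relevant_alt_spec : Claim_equal_is_relevant_alt := by
  intro alt_text target_object _
  exact build_sweep_eq (PySem.Chars.lower alt_text.toList) (PySem.Chars.lower target_object.toList)
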